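-- pv_equiv track=rewrite | github.com/mrbestnaija/portofolio_maximizer | scripts/openclaw_ops_control_plane.py | _group_issues
-- ===== SOURCE A (Python) =====
-- from typing import Any, Optional
--
-- ISSUE_CLASSES = (
--     "recoverable_service_failure",
--     "human_security_action_required",
--     "human_governance_action_required",
--     "human_economic_action_required",
-- )
--
-- def _dedupe_issues(rows: list[dict[str, Any]]) -> list[dict[str, Any]]:
--     out: list[dict[str, Any]] = []
--     seen: set[tuple[str, str, str, str, str]] = set()
--     for row in rows:
--         key = (
--             str(row.get("class") or "").strip(),
--             str(row.get("code") or "").strip(),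
--             str(row.get("detail") or "").strip(),
--             str(row.get("component") or "").strip(),
--             str(row.get("target") or "").strip(),
--         )
--         if key in seen:
--             continue
--         seen.add(key)
--         out.append(
--             {
--                 "class": key[0],
--                 "code": key[1],
--                 "detail": key[2],
--                 "component": key[3],
--                 "severity": str(row.get("severity") or "error"),
--                 "target": key[4],
--             }
--         )
--     return out
--
-- def _group_issues(rows: list[dict[str, Any]]) -> dict[str, list[dict[str, Any]]]:
--     grouped = {name: [] for name in ISSUE_CLASSES}
--     for row in _dedupe_issues(rows):
--         label = str(row.get("class") or "").strip()
--         if label not in grouped: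
--             continue
--         grouped[label].append(row)
--     return grouped
-- ===== SOURCE B (Python) =====
-- ISSUE_CLASSES = (
--     "recoverable_service_failure",
--     "human_security_action_required",
--     "human_governance_action_required",
--     "human_economic_action_required",
-- )
--
-- def _group_issues(rows):
--     # Per-class decomposition: one filtered dedupe pass per known class,
--     # no intermediate deduped list and no shared dict/set across classes.
--     def field(row, name):
--         return str(row.get(name) or "").strip()
--
--     def bucket(name):
--         seen = set()
--         acc = []
--         for row in rows:
--             if field(row, "class") != name:
--                 continue
--             key = (field(row, "code"), field(row, "detail"),
--                    field(row, "component"), field(row, "target"))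
--             if key in seen:
--                 continue
--             seen.add(key)
--             acc.append({
--                 "class": name,
--                 "code": key[0],
--                 "detail": key[1],
--                 "component": key[2],
--                 "severity": str(row.get("severity") or "error"),
--                 "target": key[3],
--             })
--         return acc
--
--     return {name: bucket(name) for name in ISSUE_CLASSES}
-- ===== Notes on version B (the rewrite author's own statement) =====
-- stated objective: alternative
-- what changed: A dedupes all rows into an intermediate list with one global seen-set and then loops again to distribute it into a pre-built dict; B drops both stages and builds each class's bucket directly by one filtered pass per issue class with a per-class seen-set of 4-tuple keys (dedup restricted to a class is equivalent because the dedup key starts with the class label).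
import Mathlib
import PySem

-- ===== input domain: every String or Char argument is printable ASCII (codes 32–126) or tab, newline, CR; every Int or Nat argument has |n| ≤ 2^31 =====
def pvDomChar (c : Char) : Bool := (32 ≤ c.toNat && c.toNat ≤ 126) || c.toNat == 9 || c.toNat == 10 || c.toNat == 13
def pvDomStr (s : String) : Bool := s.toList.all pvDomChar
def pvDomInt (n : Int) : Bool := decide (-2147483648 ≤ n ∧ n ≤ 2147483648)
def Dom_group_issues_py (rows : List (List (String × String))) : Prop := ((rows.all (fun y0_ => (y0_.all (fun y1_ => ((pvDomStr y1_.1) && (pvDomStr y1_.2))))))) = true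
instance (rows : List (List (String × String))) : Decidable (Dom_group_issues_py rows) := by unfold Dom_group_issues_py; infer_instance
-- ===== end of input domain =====

-- B replaces A's two-stage "global dedupe, then group" with one filtered dedupe pass per issue class
-- (no intermediate deduped list, no shared seen-set/dict); alternative decomposition, same cost class.


-- shared module constant and dict-get helper (both Pythons use row.get(k); str(v or "") is the
-- identity on strings and maps a missing key (None) to "", so the port is .get? k |>.getD "")
def ISSUE_CLASSES : List String :=
  ["recoverable_service_failure", "human_security_action_required",
   "human_governance_action_required", "human_economic_action_required"]

def pvGetS (row : List (String × String)) (k : String) : String :=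
  ((PySem.Dict.mk row).get? k).getD ""

-- ===== PORT A =====
-- key = the 5-tuple of stripped fields, in A's order (class, code, detail, component, target)
def keyOfA (row : List (String × String)) : String × String × String × String × String :=
  (PySem.Str.strip (pvGetS row "class"), PySem.Str.strip (pvGetS row "code"),
   PySem.Str.strip (pvGetS row "detail"), PySem.Str.strip (pvGetS row "component"),
   PySem.Str.strip (pvGetS row "target"))

-- str(row.get("severity") or "error"): missing or empty severity becomes "error"
def sevOfA (row : List (String × String)) : String :=
  let v := pvGetS row "severity"
  if v == "" then "error" else v

-- the normalized dict A appends to `out`, as its items list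
def rowOfA (k : String × String × String × String × String) (sev : String) :
    List (String × String) :=
  [("class", k.1), ("code", k.2.1), ("detail", k.2.2.1), ("component", k.2.2.2.1),
   ("severity", sev), ("target", k.2.2.2.2)]

-- the loop of _dedupe_issues: state (out, seen)
def dedupeAuxA : List (List (String × String)) → List (List (String × String)) →
    PySem.Set (String × String × String × String × String) → List (List (String × String))
  | [], out, _ => out
  | row :: rs, out, seen =>
    let k := keyOfA row
    if PySem.Set.contains seen k then dedupeAuxA rs out seen
    else dedupeAuxA rs (out ++ [rowOfA k (sevOfA row)]) (PySem.Set.add seen k)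

def dedupe_issues (rows : List (List (String × String))) : List (List (String × String)) :=
  dedupeAuxA rows [] PySem.Set.empty

-- one iteration of _group_issues' loop over the deduped rows
def groupStepA (g : PySem.Dict String (List (List (String × String))))
    (row : List (String × String)) : PySem.Dict String (List (List (String × String))) :=
  let label := PySem.Str.strip (pvGetS row "class")
  if g.contains label then g.modify label [] (fun l => l ++ [row]) else g

def group_issues_py (rows : List (List (String × String))) :
    List (String × List (List (String × String))) :=
  ((dedupe_issues rows).foldl groupStepA
    (PySem.Dict.ofList (ISSUE_CLASSES.map
      (fun n => (n, ([] : List (List (String × String)))))))).items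

-- ===== PORT B =====
def fieldB (row : List (String × String)) (name : String) : String :=
  PySem.Str.strip (pvGetS row name)

def rowOfB (name c d comp sev t : String) : List (String × String) :=
  [("class", name), ("code", c), ("detail", d), ("component", comp),
   ("severity", sev), ("target", t)]

-- B's per-class pass: filter on the class label, dedupe by the remaining 4-tuple
def bucketAuxB (name : String) : List (List (String × String)) →
    PySem.Set (String × String × String × String) → List (List (String × String)) →
    List (List (String × String))
  | [], _, acc => acc
  | row :: rs, seen, acc =>
    if fieldB row "class" ≠ name then bucketAuxB name rs seen acc
    else
      let key := (fieldB row "code", fieldB row "detail",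
                  fieldB row "component", fieldB row "target")
      if PySem.Set.contains seen key then bucketAuxB name rs seen acc
      else
        bucketAuxB name rs (PySem.Set.add seen key)
          (acc ++ [rowOfB name key.1 key.2.1 key.2.2.1
                     (let v := pvGetS row "severity"; if v == "" then "error" else v)
                     key.2.2.2])

-- the dict comprehension {name: bucket(name) for name in ISSUE_CLASSES}: the four keys are
-- distinct literals, so its items list is exactly this map
def group_issues_py_alt (rows : List (List (String × String))) :
    List (String × List (List (String × String))) :=
  ISSUE_CLASSES.map (fun n => (n, bucketAuxB n rows PySem.Set.empty []))

-- ===== PRECONDITION & SPEC =====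
def Spec_group_issues_py (rows : List (List (String × String))) (out : List (String × List (List (String × String)))) : Prop := out = group_issues_py_alt rows
instance (rows : List (List (String × String))) (out : List (String × List (List (String × String)))) : Decidable (Spec_group_issues_py rows out) := by unfold Spec_group_issues_py; infer_instance

-- ===== CLAIM (what is proved, stated in full; the proofs are below) =====
def Claim_equal_group_issues_py : Prop := ∀ (rows : List (List (String × String))), Dom_group_issues_py rows → Spec_group_issues_py rows (group_issues_py rows)

-- ===== LEMMAS AND PROOFS =====

-- dropWhile is idempotent (via List.head?_dropWhile_not)
theorem pv_dropWhile_idem {α : Type} (p : α → Bool) (l : List α) :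
    List.dropWhile p (List.dropWhile p l) = List.dropWhile p l := by
  have h := List.head?_dropWhile_not p l
  cases hd : List.dropWhile p l with
  | nil => simp
  | cons a t =>
    rw [hd] at h
    simp only [List.head?_cons] at h
    simp [h]

-- a prefix of a dropWhile result is itself dropWhile-fixed
theorem pv_dropWhile_eq_self_of_prefix {α : Type} (p : α → Bool) (l m : List α)
    (h : m <+: List.dropWhile p l) : List.dropWhile p m = m := by
  have hh := List.head?_dropWhile_not p l
  cases hm : m with
  | nil => simp
  | cons a t =>
    obtain ⟨r, hr⟩ := h
    rw [hm] at hr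
    cases hd : List.dropWhile p l with
    | nil => rw [hd] at hr; simp at hr
    | cons b s =>
      rw [hd] at hh hr
      simp only [List.head?_cons] at hh
      have hab : a = b := by
        have := congrArg List.head? hr
        simp at this
        exact this
      subst hab
      simp [hh]

theorem pv_chars_strip_idem (l : List Char) :
    PySem.Chars.strip (PySem.Chars.strip l) = PySem.Chars.strip l := by
  unfold PySem.Chars.strip PySem.Chars.rstrip PySem.Chars.lstrip
  set p := PySem.Chars.isspace with hp
  set m := List.dropWhile p l with hm
  set t := (List.dropWhile p m.reverse).reverse with ht
  have hpre : t <+: m := by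
    rw [ht]
    have hsuf : t.reverse <:+ m.reverse := by
      rw [ht, List.reverse_reverse]; exact List.dropWhile_suffix p
    exact List.reverse_suffix.mp hsuf
  have h1 : List.dropWhile p t = t := pv_dropWhile_eq_self_of_prefix p l t hpre
  rw [h1, ht, List.reverse_reverse, pv_dropWhile_idem]

theorem pv_strip_idem (s : String) :
    PySem.Str.strip (PySem.Str.strip s) = PySem.Str.strip s := by
  unfold PySem.Str.strip
  rw [show (String.ofList (PySem.Chars.strip s.toList)).toList = PySem.Chars.strip s.toList by
        simp,
      pv_chars_strip_idem]

-- the class label recomputed by A's grouping loop on a normalized row is the key's class slot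
theorem pv_lbl_rowOfA (row : List (String × String)) (sev : String) :
    PySem.Str.strip (pvGetS (rowOfA (keyOfA row) sev) "class") = (keyOfA row).1 := by
  simp [pvGetS, rowOfA, PySem.Dict.get?, keyOfA, pv_strip_idem]

-- filter of the rows carrying class label n
def fltN (n : String) (L : List (List (String × String))) : List (List (String × String)) :=
  L.filter (fun r => PySem.Str.strip (pvGetS r "class") == n)

-- A's grouping fold over any list of rows, on the concrete 4-key dict
theorem pv_groupFoldA (L : List (List (String × String))) :
    ∀ a1 a2 a3 a4 : List (List (String × String)),
    L.foldl groupStepA (PySem.Dict.mk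
      [("recoverable_service_failure", a1), ("human_security_action_required", a2),
       ("human_governance_action_required", a3), ("human_economic_action_required", a4)]) =
    PySem.Dict.mk
      [("recoverable_service_failure", a1 ++ fltN "recoverable_service_failure" L),
       ("human_security_action_required", a2 ++ fltN "human_security_action_required" L),
       ("human_governance_action_required", a3 ++ fltN "human_governance_action_required" L),
       ("human_economic_action_required", a4 ++ fltN "human_economic_action_required" L)] := by
  induction L with
  | nil => intro a1 a2 a3 a4; simp [fltN]
  | cons r L ih =>
    intro a1 a2 a3 a4
    simp only [List.foldl_cons]
    by_cases h1 : PySem.Str.strip (pvGetS r "class") = "recoverable_service_failure"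
    · rw [show groupStepA (PySem.Dict.mk
          [("recoverable_service_failure", a1), ("human_security_action_required", a2),
           ("human_governance_action_required", a3), ("human_economic_action_required", a4)]) r =
          PySem.Dict.mk
          [("recoverable_service_failure", a1 ++ [r]), ("human_security_action_required", a2),
           ("human_governance_action_required", a3), ("human_economic_action_required", a4)] by
        simp [groupStepA, PySem.Dict.contains, PySem.Dict.modify, PySem.Dict.insert,
              PySem.Dict.getD, PySem.Dict.get?, h1], ih]
      simp [fltN, h1]
    · by_cases h2 : PySem.Str.strip (pvGetS r "class") = "human_security_action_required"
      · rw [show groupStepA (PySem.Dict.mk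
            [("recoverable_service_failure", a1), ("human_security_action_required", a2),
             ("human_governance_action_required", a3), ("human_economic_action_required", a4)]) r =
            PySem.Dict.mk
            [("recoverable_service_failure", a1), ("human_security_action_required", a2 ++ [r]),
             ("human_governance_action_required", a3), ("human_economic_action_required", a4)] by
          simp [groupStepA, PySem.Dict.contains, PySem.Dict.modify, PySem.Dict.insert,
                PySem.Dict.getD, PySem.Dict.get?, h2], ih]
        simp [fltN, h2]
      · by_cases h3 : PySem.Str.strip (pvGetS r "class") = "human_governance_action_required"
        · rw [show groupStepA (PySem.Dict.mk
              [("recoverable_service_failure", a1), ("human_security_action_required", a2),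
               ("human_governance_action_required", a3), ("human_economic_action_required", a4)]) r =
              PySem.Dict.mk
              [("recoverable_service_failure", a1), ("human_security_action_required", a2),
               ("human_governance_action_required", a3 ++ [r]), ("human_economic_action_required", a4)] by
            simp [groupStepA, PySem.Dict.contains, PySem.Dict.modify, PySem.Dict.insert,
                  PySem.Dict.getD, PySem.Dict.get?, h3], ih]
          simp [fltN, h3]
        · by_cases h4 : PySem.Str.strip (pvGetS r "class") = "human_economic_action_required"
          · rw [show groupStepA (PySem.Dict.mk
                [("recoverable_service_failure", a1), ("human_security_action_required", a2),
                 ("human_governance_action_required", a3), ("human_economic_action_required", a4)]) r =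
                PySem.Dict.mk
                [("recoverable_service_failure", a1), ("human_security_action_required", a2),
                 ("human_governance_action_required", a3), ("human_economic_action_required", a4 ++ [r])] by
              simp [groupStepA, PySem.Dict.contains, PySem.Dict.modify, PySem.Dict.insert,
                    PySem.Dict.getD, PySem.Dict.get?, h4], ih]
            simp [fltN, h4]
          · rw [show groupStepA (PySem.Dict.mk
                [("recoverable_service_failure", a1), ("human_security_action_required", a2),
                 ("human_governance_action_required", a3), ("human_economic_action_required", a4)]) r =
                PySem.Dict.mk
                [("recoverable_service_failure", a1), ("human_security_action_required", a2),
                 ("human_governance_action_required", a3), ("human_economic_action_required", a4)] by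
              simp [groupStepA, PySem.Dict.contains, Ne.symm h1, Ne.symm h2, Ne.symm h3,
                    Ne.symm h4], ih]
            simp [fltN, h1, h2, h3, h4]

-- per-class correspondence between A's global dedupe and B's filtered dedupe
set_option maxHeartbeats 1000000 in
theorem pv_perClass (n : String) (rows : List (List (String × String))) :
    ∀ (out : List (List (String × String)))
      (seenA : PySem.Set (String × String × String × String × String))
      (seenB : PySem.Set (String × String × String × String)),
    (∀ a b c d : String, ((n, a, b, c, d) ∈ seenA) ↔ ((a, b, c, d) ∈ seenB)) →
    fltN n (dedupeAuxA rows out seenA) = bucketAuxB n rows seenB (fltN n out) := by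
  induction rows with
  | nil => intro out sA sB hinv; simp [dedupeAuxA, bucketAuxB]
  | cons row rs ih =>
    intro out sA sB hinv
    simp only [dedupeAuxA, bucketAuxB]
    by_cases hc : (keyOfA row).1 = n
    · have hcB : ¬ (fieldB row "class" ≠ n) := by
        simp [fieldB, keyOfA] at hc ⊢; exact hc
      have hk : keyOfA row = (n, fieldB row "code", fieldB row "detail",
          fieldB row "component", fieldB row "target") := by
        rw [← hc]; simp [keyOfA, fieldB]
      have hAB := hinv (fieldB row "code") (fieldB row "detail") (fieldB row "component")
        (fieldB row "target")
      rw [← hk] at hAB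
      by_cases hmem : keyOfA row ∈ sA
      · have hmemB : (fieldB row "code", fieldB row "detail", fieldB row "component",
            fieldB row "target") ∈ sB := hAB.mp hmem
        rw [if_neg hcB]
        simp only [PySem.Set.contains_iff, hmem, hmemB, ite_true]
        exact ih out sA sB hinv
      · have hmemB : ¬ ((fieldB row "code", fieldB row "detail", fieldB row "component",
            fieldB row "target") ∈ sB) := fun hB => hmem (hAB.mpr hB)
        rw [if_neg hcB]
        simp only [PySem.Set.contains_iff, hmem, hmemB, ite_false]
        rw [ih (out ++ [rowOfA (keyOfA row) (sevOfA row)])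
              (PySem.Set.add sA (keyOfA row))
              (PySem.Set.add sB (fieldB row "code", fieldB row "detail",
                fieldB row "component", fieldB row "target"))
              (by intro a b c d
                  rw [PySem.Set.mem_add, PySem.Set.mem_add, hinv a b c d, hk]
                  simp [Prod.ext_iff])]
        congr 1
        rw [show fltN n (out ++ [rowOfA (keyOfA row) (sevOfA row)]) =
              fltN n out ++ fltN n [rowOfA (keyOfA row) (sevOfA row)] from by simp [fltN],
            show fltN n [rowOfA (keyOfA row) (sevOfA row)] = [rowOfA (keyOfA row) (sevOfA row)]
              from by simp [fltN, pv_lbl_rowOfA, hc], hk]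
        simp [rowOfA, rowOfB, sevOfA]
    · have hcB : fieldB row "class" ≠ n := by simpa [fieldB, keyOfA] using hc
      rw [if_pos hcB]
      by_cases hmem : keyOfA row ∈ sA
      · simp only [PySem.Set.contains_iff, hmem, ite_true]
        exact ih out sA sB hinv
      · simp only [PySem.Set.contains_iff, hmem, ite_false]
        rw [ih (out ++ [rowOfA (keyOfA row) (sevOfA row)])
              (PySem.Set.add sA (keyOfA row)) sB
              (by intro a b c d
                  rw [PySem.Set.mem_add, hinv a b c d]
                  constructor
                  · rintro (h | h)
                    · exact h
                    · exact absurd (congrArg Prod.fst h).symm hc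
                  · exact Or.inl)]
        congr 1
        rw [show fltN n (out ++ [rowOfA (keyOfA row) (sevOfA row)]) =
              fltN n out ++ fltN n [rowOfA (keyOfA row) (sevOfA row)] from by simp [fltN],
            show fltN n [rowOfA (keyOfA row) (sevOfA row)] = ([] : List (List (String × String)))
              from by simp [fltN, pv_lbl_rowOfA, hc], List.append_nil]

-- ===== VERDICT (by name: the statement is the Claim_ definition above) =====
theorem group_issues_py_spec : Claim_equal_group_issues_py := by
  intro rows _
  unfold Spec_group_issues_py group_issues_py group_issues_py_alt
  have hinit : (PySem.Dict.ofList (ISSUE_CLASSES.map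
      (fun n => (n, ([] : List (List (String × String))))))) =
      PySem.Dict.mk
        [("recoverable_service_failure", []), ("human_security_action_required", []),
         ("human_governance_action_required", []), ("human_economic_action_required", [])] := by
    rfl
  rw [hinit, pv_groupFoldA]
  have hb : ∀ n, fltN n (dedupe_issues rows) = bucketAuxB n rows PySem.Set.empty [] := by
    intro n
    have := pv_perClass n rows [] PySem.Set.empty PySem.Set.empty (by intro a b c d; simp [PySem.Set.empty])
    simpa [fltN, dedupe_issues] using this
  simp [ISSUE_CLASSES, hb]
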